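-- pv_equiv track=rewrite | github.com/elonfeng/dinq-analyze | server/config/llm_models.py | _ensure_groq_primary
-- ===== SOURCE A (Python) =====
-- from typing import Optional
--
-- _DEFAULT_GROQ_ROUTE = "groq:llama-3.1-8b-instant"
--
-- _DEFAULT_OPENROUTER_FALLBACK = "google/gemini-2.5-flash-lite"
--
-- def _ensure_groq_primary(route_spec: str) -> str:
--     parts = [p.strip() for p in str(route_spec or "").split(",") if str(p).strip()]
--     groq: Optional[str] = None
--     rest: list[str] = []
--     seen: set[str] = set()
--
--     for p in parts:
--         key = p.lower()
--         if key in seen: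
--             continue
--         seen.add(key)
--         if key.startswith("groq:") and groq is None:
--             groq = p
--         else:
--             rest.append(p)
--
--     if groq is None:
--         groq = _DEFAULT_GROQ_ROUTE
--
--     # Ensure Groq route is first (de-duped).
--     out = [groq] + [p for p in rest if p.lower() != groq.lower()]
--     if len(out) == 1:
--         out.append(_DEFAULT_OPENROUTER_FALLBACK)
--     return ",".join(out)
-- ===== SOURCE B (Python) =====
-- _DEFAULT_GROQ_ROUTE = "groq:llama-3.1-8b-instant"
--
-- _DEFAULT_OPENROUTER_FALLBACK = "google/gemini-2.5-flash-lite"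
--
--
-- def _ensure_groq_primary(route_spec: str) -> str:
--     parts = [p.strip() for p in str(route_spec or "").split(",") if p.strip()]
--
--     # order-preserving case-insensitive dedup with NO auxiliary set:
--     # keep the head, recursively nub the tail with the head's key filtered out
--     def nub(xs):
--         if not xs:
--             return []
--         h = xs[0]
--         return [h] + nub([x for x in xs[1:] if x.lower() != h.lower()])
--
--     uniq = nub(parts)
--
--     for groq in uniq:
--         if groq.lower().startswith("groq:"):
--             break
--     else:
--         groq = _DEFAULT_GROQ_ROUTE
--
--     out = [groq] + [p for p in uniq if p.lower() != groq.lower()]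
--     if len(out) == 1:
--         out.append(_DEFAULT_OPENROUTER_FALLBACK)
--     return ",".join(out)
-- ===== Notes on version B (the rewrite author's own statement) =====
-- stated objective: alternative
-- what changed: A dedupes with a mutable seen-set threaded through one stateful loop that simultaneously picks the groq route; B dedupes with a recursive filter-based nub that keeps each head and filters its lowercase key out of the remaining tail (no set, no loop state), then selects the primary by a separate scan.
import Mathlib
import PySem

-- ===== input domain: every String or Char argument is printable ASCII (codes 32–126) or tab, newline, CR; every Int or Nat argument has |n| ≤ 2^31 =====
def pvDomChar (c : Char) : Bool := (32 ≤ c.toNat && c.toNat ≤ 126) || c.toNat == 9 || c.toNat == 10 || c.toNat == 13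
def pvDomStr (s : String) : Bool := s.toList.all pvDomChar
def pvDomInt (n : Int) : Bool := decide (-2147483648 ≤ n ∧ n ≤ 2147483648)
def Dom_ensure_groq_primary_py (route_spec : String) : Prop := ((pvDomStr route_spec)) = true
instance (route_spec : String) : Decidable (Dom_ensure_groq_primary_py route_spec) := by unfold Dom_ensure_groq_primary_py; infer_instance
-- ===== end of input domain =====

-- B replaces A's seen-set dedup loop by a recursive filter-based nub (no auxiliary set), then scans for the primary; same return value.

-- ===== PORT A =====
-- one step of A's loop; state = (groq, rest, seen)
def pvStepA (st : Option String × List String × PySem.Set String) (p : String) :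
    Option String × List String × PySem.Set String :=
  let key := PySem.Str.lower p
  if PySem.Set.contains st.2.2 key then st
  else
    let seen := PySem.Set.add st.2.2 key
    if PySem.Str.startswith key "groq:" && st.1.isNone then (some p, st.2.1, seen)
    else (st.1, st.2.1 ++ [p], seen)

def ensure_groq_primary_py (route_spec : String) : String :=
  let parts := (((PySem.Str.split? route_spec ",").getD []).filter
      (fun p => PySem.Str.strip p != "")).map PySem.Str.strip
  let st := parts.foldl pvStepA (none, [], PySem.Set.empty)
  let groq := st.1.getD "groq:llama-3.1-8b-instant"
  let out := [groq] ++ st.2.1.filter (fun p => PySem.Str.lower p != PySem.Str.lower groq)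
  let out := if out.length == 1 then out ++ ["google/gemini-2.5-flash-lite"] else out
  PySem.Str.join "," out

-- ===== PORT B =====
-- B's recursive nub: keep the head, filter its lowercase key out of the tail, recurse
def pvNub : List String → List String
  | [] => []
  | h :: t => h :: pvNub (t.filter (fun x => PySem.Str.lower x != PySem.Str.lower h))
termination_by xs => xs.length
decreasing_by simpa using Nat.lt_succ_of_le (t.length_filter_le _)

def ensure_groq_primary_py_alt (route_spec : String) : String :=
  let parts := (((PySem.Str.split? route_spec ",").getD []).filter
      (fun p => PySem.Str.strip p != "")).map PySem.Str.strip
  let uniq := pvNub parts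
  -- the for/break/else scan over uniq
  let groq := (uniq.find? (fun p => PySem.Str.startswith (PySem.Str.lower p) "groq:")).getD
      "groq:llama-3.1-8b-instant"
  let out := [groq] ++ uniq.filter (fun p => PySem.Str.lower p != PySem.Str.lower groq)
  let out := if out.length == 1 then out ++ ["google/gemini-2.5-flash-lite"] else out
  PySem.Str.join "," out

-- ===== PRECONDITION & SPEC =====
def Spec_ensure_groq_primary_py (route_spec : String) (out : String) : Prop := out = ensure_groq_primary_py_alt route_spec
instance (route_spec : String) (out : String) : Decidable (Spec_ensure_groq_primary_py route_spec out) := by unfold Spec_ensure_groq_primary_py; infer_instance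

-- ===== CLAIM (what is proved, stated in full; the proofs are below) =====
def Claim_equal_ensure_groq_primary_py : Prop := ∀ (route_spec : String), Dom_ensure_groq_primary_py route_spec → Spec_ensure_groq_primary_py route_spec (ensure_groq_primary_py route_spec)

-- ===== LEMMAS AND PROOFS =====

-- the groq test, abbreviated for the proofs
def pvP (p : String) : Bool := PySem.Str.startswith (PySem.Str.lower p) "groq:"

-- proof-only helper: A's dedup part in isolation; state = (uniq, seen)
def pvStepB (st : List String × PySem.Set String) (p : String) : List String × PySem.Set String :=
  let k := PySem.Str.lower p
  if PySem.Set.contains st.2 k then st else (st.1 ++ [p], PySem.Set.add st.2 k)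

-- "rest" as a function of the deduped list: drop the first element satisfying pvP
def pvRm : List String → List String
  | [] => []
  | x :: xs => if pvP x then xs else x :: pvRm xs

theorem pvRm_of_find_none {u : List String} (h : u.find? pvP = none) : pvRm u = u := by
  induction u with
  | nil => rfl
  | cons x xs ih =>
    by_cases hx : pvP x
    · rw [List.find?_cons_of_pos hx] at h; exact absurd h (by simp)
    · rw [List.find?_cons_of_neg hx] at h
      simp [pvRm, hx, ih h]

theorem pvRm_append (u : List String) (p : String) :
    pvRm (u ++ [p]) =
      if (u.find? pvP).isSome then pvRm u ++ [p]
      else if pvP p then u else u ++ [p] := by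
  induction u with
  | nil => by_cases h : pvP p <;> simp [pvRm, h]
  | cons x xs ih =>
    by_cases hx : pvP x
    · simp [pvRm, hx, List.find?_cons_of_pos hx]
    · rw [List.cons_append]
      simp only [pvRm, hx, List.find?_cons_of_neg hx, ih]
      split_ifs <;> simp_all

theorem stepA_mem {st : Option String × List String × PySem.Set String} {p : String}
    (h : PySem.Set.contains st.2.2 (PySem.Str.lower p) = true) : pvStepA st p = st := by
  have h' : PySem.Str.lower p ∈ st.2.2 := (PySem.Set.contains_iff _ _).mp h
  simp [pvStepA, h']

theorem stepA_new {st : Option String × List String × PySem.Set String} {p : String}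
    (h : ¬ PySem.Set.contains st.2.2 (PySem.Str.lower p) = true) :
    pvStepA st p =
      if pvP p && st.1.isNone then (some p, st.2.1, PySem.Set.add st.2.2 (PySem.Str.lower p))
      else (st.1, st.2.1 ++ [p], PySem.Set.add st.2.2 (PySem.Str.lower p)) := by
  rw [pvStepA, if_neg h]; rfl

theorem stepB_mem {st : List String × PySem.Set String} {p : String}
    (h : PySem.Set.contains st.2 (PySem.Str.lower p) = true) : pvStepB st p = st := by
  have h' : PySem.Str.lower p ∈ st.2 := (PySem.Set.contains_iff _ _).mp h
  simp [pvStepB, h']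

theorem stepB_new {st : List String × PySem.Set String} {p : String}
    (h : ¬ PySem.Set.contains st.2 (PySem.Str.lower p) = true) :
    pvStepB st p = (st.1 ++ [p], PySem.Set.add st.2 (PySem.Str.lower p)) := by
  rw [pvStepB, if_neg h]

-- the loop invariant: A's fold state is determined by pvStepB's deduped list
theorem loop_eq (parts : List String) : ∀ (u : List String),
    parts.foldl pvStepA (u.find? pvP, pvRm u, u.map PySem.Str.lower) =
      ((parts.foldl pvStepB (u, u.map PySem.Str.lower)).1.find? pvP,
       pvRm (parts.foldl pvStepB (u, u.map PySem.Str.lower)).1,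
       (parts.foldl pvStepB (u, u.map PySem.Str.lower)).2) := by
  induction parts with
  | nil => intro u; simp
  | cons p ps ih =>
    intro u
    simp only [List.foldl_cons]
    by_cases hmem : PySem.Set.contains (u.map PySem.Str.lower) (PySem.Str.lower p) = true
    · rw [stepA_mem hmem, stepB_mem hmem]; exact ih u
    · have hadd : PySem.Set.add (u.map PySem.Str.lower) (PySem.Str.lower p)
          = u.map PySem.Str.lower ++ [PySem.Str.lower p] := by
        unfold PySem.Set.add; rw [if_neg hmem]
      have hmap : (u ++ [p]).map PySem.Str.lower
          = PySem.Set.add (u.map PySem.Str.lower) (PySem.Str.lower p) := by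
        rw [List.map_append, hadd]; rfl
      have H := ih (u ++ [p])
      rw [hmap] at H
      rw [stepA_new hmem, stepB_new hmem]
      dsimp only
      by_cases hp : pvP p
      · cases hg : u.find? pvP with
        | some g =>
          have h1 : (u ++ [p]).find? pvP = some g := by
            rw [List.find?_append, hg]; rfl
          have h2 : pvRm (u ++ [p]) = pvRm u ++ [p] := by
            rw [pvRm_append, hg]; simp
          rw [h1, h2] at H
          rw [if_neg (by simp)]
          exact H
        | none =>
          have h1 : (u ++ [p]).find? pvP = some p := by
            rw [List.find?_append, hg]; simp [hp]
          have h2 : pvRm (u ++ [p]) = u := by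
            rw [pvRm_append, hg]; simp [hp]
          rw [h1, h2] at H
          rw [if_pos (by simp [hp]), pvRm_of_find_none hg]
          exact H
      · rw [if_neg (by simp [hp])]
        have h1 : (u ++ [p]).find? pvP = u.find? pvP := by
          rw [List.find?_append]
          have hnil : List.find? pvP [p] = none := by simp [hp]
          rw [hnil]; cases u.find? pvP <;> rfl
        rw [h1] at H
        cases hg : u.find? pvP with
        | some g =>
          have h2 : pvRm (u ++ [p]) = pvRm u ++ [p] := by
            rw [pvRm_append, hg]; simp
          rw [h2, hg] at H
          exact H
        | none =>
          have h2 : pvRm (u ++ [p]) = u ++ [p] := by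
            rw [pvRm_append, hg]; simp [hp]
          rw [h2, hg] at H
          rw [pvRm_of_find_none hg]
          exact H

-- the seen-set fold computes exactly the filter-based nub of the not-yet-seen elements
theorem foldB_nub : ∀ (parts u : List String) (s : PySem.Set String),
    (parts.foldl pvStepB (u, s)).1
      = u ++ pvNub (parts.filter (fun p => !(PySem.Set.contains s (PySem.Str.lower p)))) := by
  intro parts
  induction parts with
  | nil => intro u s; simp [pvNub]
  | cons p ps ih =>
    intro u s
    simp only [List.foldl_cons, List.filter_cons]
    by_cases hmem : PySem.Set.contains s (PySem.Str.lower p) = true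
    · rw [stepB_mem hmem]
      have hm : PySem.Str.lower p ∈ s := (PySem.Set.contains_iff _ _).mp hmem
      simp [hm, ih]
    · rw [stepB_new hmem]
      have hm : (!PySem.Set.contains s (PySem.Str.lower p)) = true := by
        rw [Bool.of_not_eq_true hmem]; rfl
      rw [if_pos hm, pvNub]
      have hadd : PySem.Set.add s (PySem.Str.lower p) = s ++ [PySem.Str.lower p] := by
        unfold PySem.Set.add; rw [if_neg hmem]
      have hfilt : ps.filter (fun x => !(PySem.Set.contains (PySem.Set.add s (PySem.Str.lower p)) (PySem.Str.lower x)))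
          = (ps.filter (fun x => !(PySem.Set.contains s (PySem.Str.lower x)))).filter
              (fun x => PySem.Str.lower x != PySem.Str.lower p) := by
        rw [List.filter_filter]
        apply List.filter_congr
        intro x _
        rw [hadd]
        by_cases hx : PySem.Str.lower x = PySem.Str.lower p
        · simp [hx]
        · simp [hx]
      rw [ih, hfilt]
      simp

-- every element of the nub came from the original list
theorem nub_sub_n : ∀ (n : Nat) (xs : List String), xs.length ≤ n → ∀ a ∈ pvNub xs, a ∈ xs := by
  intro n
  induction n with
  | zero =>
    intro xs h
    cases xs with
    | nil => simp [pvNub]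
    | cons x t => simp at h
  | succ n ih =>
    intro xs h
    cases xs with
    | nil => simp [pvNub]
    | cons x t =>
      intro a ha
      rw [pvNub] at ha
      rcases List.mem_cons.mp ha with h1 | h1
      · simp [h1]
      · have hlen : (t.filter (fun y => PySem.Str.lower y != PySem.Str.lower x)).length ≤ n :=
          le_trans (t.length_filter_le _) (by simpa using Nat.le_of_succ_le_succ h)
        exact List.mem_cons_of_mem _ (List.mem_of_mem_filter (ih _ hlen a h1))

-- the lowered keys of the nub are pairwise distinct
theorem nub_nodup_n : ∀ (n : Nat) (xs : List String), xs.length ≤ n →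
    ((pvNub xs).map PySem.Str.lower).Nodup := by
  intro n
  induction n with
  | zero =>
    intro xs h
    cases xs with
    | nil => simp [pvNub]
    | cons x t => simp at h
  | succ n ih =>
    intro xs h
    cases xs with
    | nil => simp [pvNub]
    | cons x t =>
      rw [pvNub, List.map_cons, List.nodup_cons]
      have hlen : (t.filter (fun y => PySem.Str.lower y != PySem.Str.lower x)).length ≤ n :=
        le_trans (t.length_filter_le _) (by simpa using Nat.le_of_succ_le_succ h)
      refine ⟨?_, ih _ hlen⟩
      intro hc
      rcases List.mem_map.mp hc with ⟨a, ha, hal⟩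
      have := List.of_mem_filter (nub_sub_n _ _ hlen a ha)
      simp [hal] at this

theorem nub_nodup (xs : List String) : ((pvNub xs).map PySem.Str.lower).Nodup :=
  nub_nodup_n xs.length xs le_rfl

-- with distinct lowered keys, filtering out groq's key from uniq equals filtering it from rest
theorem rm_filter (g : String) : ∀ (u : List String),
    (u.map PySem.Str.lower).Nodup → u.find? pvP = some g →
    (pvRm u).filter (fun p => PySem.Str.lower p != PySem.Str.lower g)
      = u.filter (fun p => PySem.Str.lower p != PySem.Str.lower g) := by
  intro u
  induction u with
  | nil => intro _ h; simp at h
  | cons x xs ih =>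
    intro hnd hf
    by_cases hx : pvP x
    · rw [List.find?_cons_of_pos hx] at hf
      injection hf with hf
      subst hf
      have hall : ∀ p ∈ xs, (PySem.Str.lower p != PySem.Str.lower x) = true := by
        intro p hp
        simp only [List.map_cons, List.nodup_cons] at hnd
        simp only [bne_iff_ne, ne_eq]
        intro hc
        exact hnd.1 (hc ▸ List.mem_map_of_mem hp)
      simp [pvRm, hx, List.filter_eq_self.mpr hall]
    · rw [List.find?_cons_of_neg hx] at hf
      have hxg : (PySem.Str.lower x != PySem.Str.lower g) = true := by
        simp only [bne_iff_ne, ne_eq]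
        intro hc
        have hg : pvP g = true := List.find?_some hf
        have : pvP x = true := by simpa [pvP, hc] using hg
        exact hx this
      simp only [List.map_cons, List.nodup_cons] at hnd
      simp [pvRm, hx, hxg, ih hnd.2 hf]

-- ===== VERDICT (by name: the statement is the Claim_ definition above) =====
theorem ensure_groq_primary_py_spec : Claim_equal_ensure_groq_primary_py := by
  intro route_spec _
  unfold Spec_ensure_groq_primary_py ensure_groq_primary_py ensure_groq_primary_py_alt
  simp only [show (fun p => PySem.Str.startswith (PySem.Str.lower p) "groq:") = pvP from rfl]
  set parts := (((PySem.Str.split? route_spec ",").getD []).filter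
      (fun p => PySem.Str.strip p != "")).map PySem.Str.strip with hparts
  have h0 := loop_eq parts []
  simp only [List.map_nil, List.find?_nil, pvRm] at h0
  have hU : (parts.foldl pvStepB ([], ([] : PySem.Set String))).1 = pvNub parts := by
    rw [foldB_nub parts [] []]
    have : parts.filter (fun p => !(PySem.Set.contains ([] : PySem.Set String) (PySem.Str.lower p)))
        = parts := List.filter_eq_self.mpr (by intro a _; simp [PySem.Set.contains])
    rw [this]; rfl
  rw [show (PySem.Set.empty : PySem.Set String) = ([] : List String) from rfl, h0, hU]
  have hnd := nub_nodup parts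
  cases hg : (pvNub parts).find? pvP with
  | some g =>
    dsimp only
    simp only [Option.getD_some]
    rw [rm_filter g (pvNub parts) hnd hg]
  | none =>
    dsimp only
    rw [pvRm_of_find_none hg]
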